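-- pv_equiv track=rewrite | github.com/workingenius/langbasic | parser.py | _divide_with_e
-- ===== SOURCE A (Python) =====
-- def _divide_with_e(sentence, part_num):
--     """
--     same as divide, allow empty cups.
--     """
--     assert part_num != 0, \
--         'len(sentence): {}, part_num: {}'.format(len(sentence), part_num)
--     if len(sentence) == 0:
--         yield [[]] * part_num
--     elif part_num == 1:
--         yield [sentence]
--     else:
--         for i in range(len(sentence) + 1):
--             for sub_div in _divide_with_e(sentence[i:], part_num - 1):
--                 r = [sentence[:i]]
--                 r.extend(sub_div)
--                 yield r
-- ===== SOURCE B (Python) =====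
-- def _divide_with_e(sentence, part_num):
--     """
--     same as divide, allow empty cups.
--     """
--     assert part_num != 0, \
--         'len(sentence): {}, part_num: {}'.format(len(sentence), part_num)
--     if len(sentence) == 0:
--         yield [[]] * part_num
--         return
--     n = len(sentence)
--     # build all non-decreasing cut-position tuples [0, c1, ..., c_{k}] level by level
--     tuples = [[0]]
--     for _ in range(part_num - 1):
--         tuples = [t + [j] for t in tuples for j in range(t[-1], n + 1)]
--     for t in tuples:
--         bounds = t + [n]
--         yield [sentence[a:b] for a, b in zip(bounds, bounds[1:])]
-- ===== Notes on version B (the rewrite author's own statement) =====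
-- stated objective: alternative
-- what changed: Replaces A's head-slice recursion with an iterative level-by-level construction of all non-decreasing cut-position tuples, then slices the sentence once per tuple; no recursion.
import Mathlib
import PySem

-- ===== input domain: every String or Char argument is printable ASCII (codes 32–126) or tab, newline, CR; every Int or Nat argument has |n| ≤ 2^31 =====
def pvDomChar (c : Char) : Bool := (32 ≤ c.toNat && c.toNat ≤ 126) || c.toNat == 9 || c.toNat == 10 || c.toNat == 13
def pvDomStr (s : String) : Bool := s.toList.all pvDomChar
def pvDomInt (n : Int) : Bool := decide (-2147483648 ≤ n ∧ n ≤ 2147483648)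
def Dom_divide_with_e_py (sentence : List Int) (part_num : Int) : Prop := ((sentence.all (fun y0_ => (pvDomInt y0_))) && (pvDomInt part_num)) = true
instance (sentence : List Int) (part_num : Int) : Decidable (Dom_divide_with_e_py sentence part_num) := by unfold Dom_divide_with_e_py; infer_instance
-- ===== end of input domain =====

-- B replaces A's head-slice recursion by an iterative level-by-level construction of the
-- non-decreasing cut-position tuples, then slices once per tuple (objective: alternative).

-- ===== PORT A =====
-- Fuel = part_num (the recursion decreases part_num by 1 each call and, inside Pre_,
-- stops at part_num = 1); fuel 0 is unreachable on admitted inputs.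
def dAgo : Nat → List Int → List (List (List Int))
  | 0, _ => []
  | n + 1, s =>
    if s.length = 0 then [List.replicate (n + 1) []]
    else if n = 0 then [[s]]        -- part_num == 1
    else (List.range (s.length + 1)).flatMap (fun i =>
      (dAgo n (s.drop i)).map (fun sub => s.take i :: sub))

def divide_with_e_py (sentence : List Int) (part_num : Int) : List (List (List Int)) :=
  -- top-level: '[[]] * part_num' for empty sentence ([[]]*p = [] when p < 0, so .toNat is exact)
  if sentence.length = 0 then [List.replicate part_num.toNat []]
  else dAgo part_num.toNat sentence

-- ===== PORT B =====
-- one level step: extend every tuple t by every j in range(t[-1], n+1); t is never empty,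
-- so t.getLastD 0 is exactly Python's t[-1]
def stepB (n : Nat) (ts : List (List Nat)) : List (List Nat) :=
  ts.flatMap (fun t => (List.range' (t.getLastD 0) (n + 1 - t.getLastD 0)).map (fun j => t ++ [j]))

def divide_with_e_py_alt (sentence : List Int) (part_num : Int) : List (List (List Int)) :=
  if sentence.length = 0 then [List.replicate part_num.toNat []]
  else
    -- tuples = the cut-boundary lists built level by level; then one slice pass per tuple,
    -- sentence[a:b] with 0 ≤ a ≤ b ≤ len(sentence) being exactly (drop a).take (b - a)
    (((List.range (part_num - 1).toNat).foldl (fun ts _ => stepB sentence.length ts) [[0]]).map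
      (fun t =>
        ((t ++ [sentence.length]).zip (t ++ [sentence.length]).tail).map
          (fun ab => (sentence.drop ab.1).take (ab.2 - ab.1))))

-- ===== PRECONDITION & SPEC =====
-- Pre_ excludes exactly the raising inputs: part_num = 0 (AssertionError) and
-- part_num < 0 with a non-empty sentence (unbounded recursion, RecursionError).
def Pre_divide_with_e_py (sentence : List Int) (part_num : Int) : Prop :=
  1 ≤ part_num ∨ (sentence = [] ∧ part_num ≤ -1)
instance (sentence : List Int) (part_num : Int) : Decidable (Pre_divide_with_e_py sentence part_num) := by unfold Pre_divide_with_e_py; infer_instance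

def pvWitness_divide_with_e_py : List Int × Int := ([1, 2], 2)

def Spec_divide_with_e_py (sentence : List Int) (part_num : Int) (out : List (List (List Int))) : Prop := out = divide_with_e_py_alt sentence part_num
instance (sentence : List Int) (part_num : Int) (out : List (List (List Int))) : Decidable (Spec_divide_with_e_py sentence part_num out) := by unfold Spec_divide_with_e_py; infer_instance

-- ===== CLAIM (what is proved, stated in full; the proofs are below) =====
def Claim_equal_divide_with_e_py : Prop := ∀ (sentence : List Int) (part_num : Int), Dom_divide_with_e_py sentence part_num → Pre_divide_with_e_py sentence part_num → Spec_divide_with_e_py sentence part_num (divide_with_e_py sentence part_num)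

-- ===== LEMMAS AND PROOFS =====

-- all non-decreasing cut lists of length k with entries in [a, n], in lexicographic order
def Cnd : Nat → Nat → Nat → List (List Nat)
  | 0, _, _ => [[]]
  | k + 1, a, n => (List.range' a (n + 1 - a)).flatMap (fun i => (Cnd k i n).map (i :: ·))

def slicesOf (s : List Int) (bs : List Nat) : List (List Int) :=
  (bs.zip bs.tail).map (fun ab => (s.drop ab.1).take (ab.2 - ab.1))

theorem slicesOf_cons (s : List Int) (a b : Nat) (rest : List Nat) :
    slicesOf s (a :: b :: rest) = (s.drop a).take (b - a) :: slicesOf s (b :: rest) := by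
  simp [slicesOf]

theorem slicesOf_replicate (s : List Int) (m c : Nat) :
    slicesOf s (List.replicate (m + 1) c) = List.replicate m [] := by
  induction m with
  | zero => simp [slicesOf]
  | succ m ih =>
    have h1 : List.replicate (m + 1 + 1) c = c :: c :: List.replicate m c := by
      simp [List.replicate_succ]
    rw [h1, slicesOf_cons]
    have h2 : (c :: List.replicate m c) = List.replicate (m + 1) c := by
      simp [List.replicate_succ]
    rw [h2, ih]
    simp [List.replicate_succ]

theorem Cnd_self (k n : Nat) : Cnd k n n = [List.replicate k n] := by
  induction k with
  | zero => simp [Cnd]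
  | succ k ih => simp [Cnd, ih, List.replicate_succ]

theorem flatMap_congr_mem {α β : Type} {l : List α} {f g : α → List β}
    (h : ∀ x ∈ l, f x = g x) : l.flatMap f = l.flatMap g := by
  induction l with
  | nil => rfl
  | cons x xs ih =>
    simp only [List.flatMap_cons]
    rw [h x (by simp), ih (fun y hy => h y (by simp [hy]))]

theorem dAgo_succ (n : Nat) (s : List Int) (h : s.length ≠ 0) (h2 : n ≠ 0) :
    dAgo (n + 1) s = (List.range (s.length + 1)).flatMap (fun i =>
      (dAgo n (s.drop i)).map (fun sub => s.take i :: sub)) := by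
  show (if s.length = 0 then [List.replicate (n + 1) []]
        else if n = 0 then [[s]]
        else (List.range (s.length + 1)).flatMap (fun i =>
          (dAgo n (s.drop i)).map (fun sub => s.take i :: sub))) = _
  rw [if_neg h, if_neg h2]

theorem dAgo_char : ∀ (k : Nat) (s0 : List Int) (a : Nat), a ≤ s0.length →
    dAgo (k + 1) (s0.drop a) =
      (Cnd k a s0.length).map (fun cuts => slicesOf s0 (a :: (cuts ++ [s0.length]))) := by
  intro k
  induction k with
  | zero =>
    intro s0 a ha
    by_cases he : a = s0.length
    · subst he
      simp [dAgo, Cnd, slicesOf]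
    · have hlt : a < s0.length := lt_of_le_of_ne ha he
      have hne : (s0.drop a).length ≠ 0 := by simp; omega
      have htk : (s0.drop a).take (s0.length - a) = s0.drop a :=
        List.take_of_length_le (by simp)
      simp only [dAgo, Cnd, List.map_cons, List.map_nil, if_neg hne]
      simp [slicesOf, htk]
  | succ k ih =>
    intro s0 a ha
    by_cases he : a = s0.length
    · subst he
      have hrep : (s0.length :: (List.replicate (k + 1) s0.length ++ [s0.length]))
          = List.replicate (k + 3) s0.length := by
        rw [← List.replicate_succ', ← List.replicate_succ]
      simp only [Cnd_self, List.map_cons, List.map_nil, hrep, slicesOf_replicate]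
      simp [dAgo]
    · have hlt : a < s0.length := lt_of_le_of_ne ha he
      have hne : (s0.drop a).length ≠ 0 := by simp; omega
      rw [dAgo_succ (k + 1) (s0.drop a) hne (by omega)]
      rw [show Cnd (k + 1) a s0.length
            = (List.range' a (s0.length + 1 - a)).flatMap
                (fun c => (Cnd k c s0.length).map (c :: ·)) from rfl]
      rw [List.range'_eq_map_range, List.flatMap_map, List.map_flatMap]
      have hlen2 : s0.length + 1 - a = (s0.drop a).length + 1 := by simp; omega
      rw [hlen2]
      apply flatMap_congr_mem
      intro i hi
      have hi' : i ≤ s0.length - a := by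
        have := List.mem_range.1 hi
        simp at this
        omega
      rw [List.drop_drop, ih s0 (a + i) (by omega)]
      rw [List.map_map, List.map_map]
      apply List.map_congr_left
      intro cuts _
      simp only [Function.comp_apply]
      rw [List.cons_append, slicesOf_cons]
      have h3 : a + i - a = i := by omega
      rw [h3]

-- extensions of a tuple t by k more non-decreasing entries ≤ n
def En (n : Nat) : Nat → List Nat → List (List Nat)
  | 0, t => [t]
  | k + 1, t =>
    ((List.range' (t.getLastD 0) (n + 1 - t.getLastD 0)).map (fun j => t ++ [j])).flatMap
      (En n k)

theorem foldB (n : Nat) : ∀ (k : Nat) (ts : List (List Nat)),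
    (List.range k).foldl (fun ts _ => stepB n ts) ts = ts.flatMap (En n k) := by
  intro k
  induction k with
  | zero => intro ts; simp [En]
  | succ k ih =>
    intro ts
    rw [List.range_succ_eq_map]
    simp only [List.foldl_cons, List.foldl_map]
    rw [ih (stepB n ts)]
    simp only [stepB, List.flatMap_assoc]
    rfl

theorem En_char (n : Nat) : ∀ (k : Nat) (t : List Nat) (a : Nat), t.getLast? = some a →
    En n k t = (Cnd k a n).map (fun cuts => t ++ cuts) := by
  intro k
  induction k with
  | zero => intro t a _; simp [En, Cnd]
  | succ k ih =>
    intro t a hlast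
    have hd : t.getLastD 0 = a := by
      cases t with
      | nil => simp at hlast
      | cons x xs => simp [List.getLastD_eq_getLast?, hlast]
    simp only [En, hd, List.flatMap_map, Cnd, List.map_flatMap]
    apply flatMap_congr_mem
    intro j _
    rw [ih (t ++ [j]) j (by simp)]
    rw [List.map_map]
    apply List.map_congr_left
    intro cuts _
    simp

-- ===== VERDICT (by name: the statement is the Claim_ definition above) =====
theorem divide_with_e_py_spec : Claim_equal_divide_with_e_py := by
  intro s p _ hpre
  unfold Spec_divide_with_e_py divide_with_e_py divide_with_e_py_alt
  by_cases hs : s.length = 0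
  · simp [hs]
  · rw [if_neg hs, if_neg hs]
    have hp : 1 ≤ p := by
      rcases hpre with h | ⟨h, _⟩
      · exact h
      · simp [h] at hs
    have hk : p.toNat = (p - 1).toNat + 1 := by omega
    set k := (p - 1).toNat with hkdef
    rw [hk]
    have hA := dAgo_char k s 0 (Nat.zero_le _)
    simp only [List.drop_zero] at hA
    rw [hA, foldB s.length k [[0]]]
    have hE := En_char s.length k [0] 0 (by simp)
    simp only [List.flatMap_cons, List.flatMap_nil, List.append_nil]
    rw [hE, List.map_map]
    apply List.map_congr_left
    intro cuts _
    simp [slicesOf]
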